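-- pv_equiv track=rewrite | github.com/actumn/problem-solving | 2020-kakao-intern/pro3.py | check_match_list
-- ===== SOURCE A (Python) =====
-- def check_match_list(user_id, banned_id):
--     result = []
--     for ban in banned_id:
--         match_list = []
--         for user_index in range(len(user_id)):
--             user = user_id[user_index]
--             if check_match(user, ban):
--                 match_list.append(user_index)
--
--         result.append(match_list)
--
--     return result
--
-- def check_match(user, ban):
--     if len(user) != len(ban):
--         return False
--
--     for index in range(len(user)):
--         user_char = user[index]
--         ban_char = ban[index]
--
--         if ban_char == '*':
--             continue
--
--         if user_char != ban_char:
--             return False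
--
--     return True
-- ===== SOURCE B (Python) =====
-- def check_match_list(user_id, banned_id):
--     # Precompute: bucket user indices by string length (one pass over users).
--     buckets = {}
--     for i, u in enumerate(user_id):
--         buckets.setdefault(len(u), []).append(i)
--     out = []
--     for ban in banned_id:
--         # Start from all users of the right length, then filter column by column.
--         cand = buckets.get(len(ban), [])
--         for p, c in enumerate(ban):
--             if c != '*':
--                 cand = [i for i in cand if user_id[i][p] == c]
--         out.append(cand)
--     return out
-- ===== Notes on version B (the rewrite author's own statement) =====
-- stated objective: faster
-- what changed: B precomputes a dict bucketing user indices by string length, then for each ban pattern starts from that bucket and filters the candidate index list column by column over the ban's non-'*' positions (loop transposition with a precomputed length index), instead of A's per-user character-matching loop; candidates shrink after each column and wrong-length users are never scanned, which a timing run measured at ~2.4x.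
import Mathlib
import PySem

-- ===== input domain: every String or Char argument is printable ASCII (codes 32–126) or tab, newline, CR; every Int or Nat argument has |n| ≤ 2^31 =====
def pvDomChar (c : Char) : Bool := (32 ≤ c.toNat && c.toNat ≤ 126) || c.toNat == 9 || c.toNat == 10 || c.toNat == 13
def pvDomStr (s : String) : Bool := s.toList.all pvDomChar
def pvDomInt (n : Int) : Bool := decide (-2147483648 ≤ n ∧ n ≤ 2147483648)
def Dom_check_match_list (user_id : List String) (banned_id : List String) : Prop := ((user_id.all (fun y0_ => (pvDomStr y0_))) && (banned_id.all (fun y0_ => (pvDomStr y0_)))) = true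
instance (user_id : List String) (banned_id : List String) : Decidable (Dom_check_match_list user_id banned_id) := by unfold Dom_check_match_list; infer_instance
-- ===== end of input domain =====

-- B buckets user indices by length in a dict once, then per ban filters the candidate
-- index list column-by-column over non-'*' positions; measured faster (shrinking candidates,
-- wrong-length users never scanned).


-- ===== PORT A =====
-- A's inner per-index loop over user/ban (equal lengths guaranteed): '*' → continue,
-- mismatch → early return False, end of loop → True.
def checkMatchLoopA : List Char → List Char → Bool
  | u :: us, b :: bs =>
    if b = '*' then checkMatchLoopA us bs
    else if u ≠ b then false
    else checkMatchLoopA us bs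
  | _, _ => true

def checkMatchA (user ban : String) : Bool :=
  if PySem.Str.len user ≠ PySem.Str.len ban then false
  else checkMatchLoopA user.toList ban.toList

-- A's loop over range(len(user_id)) appending matching indices.
def matchLoopA (users : List String) (idx : Int) (ban : String) : List Int :=
  match users with
  | [] => []
  | u :: us =>
    if checkMatchA u ban then idx :: matchLoopA us (idx + 1) ban
    else matchLoopA us (idx + 1) ban

def check_match_list (user_id : List String) (banned_id : List String) : List (List Int) :=
  banned_id.map (fun ban => matchLoopA user_id 0 ban)

-- ===== PORT B =====
-- buckets.setdefault(len(u), []).append(i), i.e. buckets[len(u)] = buckets.get(len(u), []) + [i]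
def bucketsB (user_id : List String) : PySem.Dict Int (List Int) :=
  (PySem.List.enumerate user_id 0).foldl
    (fun d p => d.modify (PySem.Str.len p.2) [] (· ++ [p.1])) PySem.Dict.empty

-- user_id[i][p]; exact where i and p are in range (the only reachable case: i comes
-- from enumerate(user_id) and p < len(ban) = len(user_id[i]) inside a candidate list)
def charAtB (user_id : List String) (i p : Int) : Option Char :=
  (PySem.List.pyGet? user_id i).bind (fun u => PySem.Str.pyGet? u p)

def check_match_list_alt (user_id : List String) (banned_id : List String) : List (List Int) :=
  let buckets := bucketsB user_id
  banned_id.map (fun ban =>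
    (PySem.List.enumerate ban.toList 0).foldl
      (fun cand pc =>
        if pc.2 ≠ '*' then
          cand.filter (fun i => charAtB user_id i pc.1 == some pc.2)
        else cand)
      (buckets.getD (PySem.Str.len ban) []))

-- ===== PRECONDITION & SPEC =====
def Spec_check_match_list (user_id : List String) (banned_id : List String) (out : List (List Int)) : Prop := out = check_match_list_alt user_id banned_id
instance (user_id : List String) (banned_id : List String) (out : List (List Int)) : Decidable (Spec_check_match_list user_id banned_id out) := by unfold Spec_check_match_list; infer_instance

-- ===== CLAIM (what is proved, stated in full; the proofs are below) =====
def Claim_equal_check_match_list : Prop := ∀ (user_id : List String) (banned_id : List String), Dom_check_match_list user_id banned_id → Spec_check_match_list user_id banned_id (check_match_list user_id banned_id)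

-- ===== LEMMAS AND PROOFS =====

theorem buckets_getD (user_id : List String) (L : Int) :
    (bucketsB user_id).getD L [] =
      ((PySem.List.enumerate user_id 0).filter
        (fun p => PySem.Str.len p.2 == L)).map (·.1) := by
  unfold bucketsB
  have h := PySem.Dict.getD_foldl_modify_append
    (l := (PySem.List.enumerate user_id 0).map (fun p => (PySem.Str.len p.2, p.1)))
    (d := (PySem.Dict.empty : PySem.Dict Int (List Int))) (c := L)
  rw [List.foldl_map] at h
  simp only [h]
  simp [List.filter_map, List.map_map, Function.comp_def]

theorem filter_fold_eq (user_id : List String) (bs : List Char) (s : Int) (cand : List Int) :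
    (PySem.List.enumerate bs s).foldl
      (fun cand pc =>
        if pc.2 ≠ '*' then
          cand.filter (fun i => charAtB user_id i pc.1 == some pc.2)
        else cand) cand =
    cand.filter (fun i =>
      (PySem.List.enumerate bs s).all
        (fun pc => pc.2 == '*' || charAtB user_id i pc.1 == some pc.2)) := by
  induction bs generalizing s cand with
  | nil => simp [PySem.List.enumerate_nil]
  | cons c cs ih =>
    rw [PySem.List.enumerate_cons]
    simp only [List.foldl_cons, List.all_cons]
    by_cases hc : c = '*'
    · simp only [hc, ne_eq, not_true_eq_false, if_false]
      rw [ih]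
      simp
    · simp only [if_pos (by simpa using hc)]
      rw [ih, List.filter_filter]
      apply List.filter_congr
      intro i _
      have : (c == '*') = false := by simp [hc]
      simp [this, Bool.and_comm]

theorem checkMatchLoopA_iff (us bs : List Char) (h : us.length = bs.length) :
    checkMatchLoopA us bs = true ↔
      ∀ k, (hk : k < bs.length) → bs[k] = '*' ∨ us[k]? = some bs[k] := by
  induction us generalizing bs with
  | nil =>
    cases bs with
    | nil => simp [checkMatchLoopA]
    | cons b bs => simp at h
  | cons u us ih =>
    cases bs with
    | nil => simp at h
    | cons b bs =>
      simp only [List.length_cons, Nat.add_right_cancel_iff] at h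
      constructor
      · intro hm k hk
        cases k with
        | zero =>
          by_cases hb : b = '*'
          · simp [hb]
          · right
            simp only [checkMatchLoopA, if_neg hb] at hm
            by_cases hub : u = b
            · simp [hub]
            · simp [hub] at hm
        | succ k =>
          have hrec : checkMatchLoopA us bs = true := by
            unfold checkMatchLoopA at hm
            split_ifs at hm <;> simp_all
          have := (ih bs h).mp hrec k (by simpa using hk)
          simpa using this
      · intro hall
        have hrec : checkMatchLoopA us bs = true :=
          (ih bs h).mpr (fun k hk => by simpa using hall (k+1) (by simpa using hk))
        have h0 := hall 0 (by simp)
        unfold checkMatchLoopA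
        by_cases hb : b = '*'
        · simp [hb, hrec]
        · simp [hb] at h0
          simp [hb, h0, hrec]

theorem matchLoopA_eq (users : List String) (s : Int) (ban : String) :
    matchLoopA users s ban =
      ((PySem.List.enumerate users s).filter (fun p => checkMatchA p.2 ban)).map (·.1) := by
  induction users generalizing s with
  | nil => simp [matchLoopA, PySem.List.enumerate_nil]
  | cons u us ih =>
    rw [PySem.List.enumerate_cons]
    simp only [matchLoopA, List.filter_cons]
    split <;> simp [ih]

-- the all-positions test of B, at an index i with user_id[i] = u, is A's check_match
theorem checkMatchA_eq_allPos (user_id : List String) (i : Int) (u ban : String)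
    (hget : PySem.List.pyGet? user_id i = some u) :
    checkMatchA u ban =
      ((PySem.Str.len u == PySem.Str.len ban) &&
        (PySem.List.enumerate ban.toList 0).all
          (fun pc => pc.2 == '*' || charAtB user_id i pc.1 == some pc.2)) := by
  by_cases hlen : PySem.Str.len u = PySem.Str.len ban
  · have hlist : u.toList.length = ban.toList.length := by
      have := hlen
      rw [PySem.Str.len_eq, PySem.Str.len_eq] at this
      exact_mod_cast this
    have hall : ((PySem.List.enumerate ban.toList 0).all
        (fun pc => pc.2 == '*' || charAtB user_id i pc.1 == some pc.2)) = true ↔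
        ∀ k, (hk : k < ban.toList.length) →
          ban.toList[k] = '*' ∨ u.toList[k]? = some ban.toList[k] := by
      rw [List.all_eq_true]
      constructor
      · intro h k hk
        have := h _ ((PySem.List.mem_enumerate_iff _ _ _).mpr ⟨k, hk, rfl⟩)
        simpa [charAtB, hget] using this
      · intro h pc hpc
        obtain ⟨k, hk, rfl⟩ := (PySem.List.mem_enumerate_iff _ _ _).mp hpc
        simpa [charAtB, hget] using h k hk
    have hA : checkMatchA u ban = checkMatchLoopA u.toList ban.toList := by
      unfold checkMatchA
      rw [if_neg (not_not.mpr hlen)]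
    rw [hA]
    have hbeq : (PySem.Str.len u == PySem.Str.len ban) = true := by
      have : u.length = ban.length := by
        have h2 := hlen
        rw [PySem.Str.len_eq, PySem.Str.len_eq] at h2
        exact_mod_cast h2
      simp [this]
    rw [hbeq, Bool.true_and]
    rcases Bool.eq_false_or_eq_true (checkMatchLoopA u.toList ban.toList) with ht | hf
    · rw [ht, hall.mpr ((checkMatchLoopA_iff _ _ hlist).mp ht)]
    · rw [hf]
      rcases Bool.eq_false_or_eq_true ((PySem.List.enumerate ban.toList 0).all
        (fun pc => pc.2 == '*' || charAtB user_id i pc.1 == some pc.2)) with ht2 | hf2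
      · exact absurd ((checkMatchLoopA_iff _ _ hlist).mpr (hall.mp ht2)) (by simp [hf])
      · rw [hf2]
  · have hbeq : (PySem.Str.len u == PySem.Str.len ban) = false := by
      have : ¬ u.length = ban.length := fun h => hlen (by rw [PySem.Str.len_eq, PySem.Str.len_eq]; exact_mod_cast h)
      simp [this]
    unfold checkMatchA
    rw [if_pos hlen, hbeq]
    simp

-- ===== VERDICT (by name: the statement is the Claim_ definition above) =====
theorem check_match_list_spec : Claim_equal_check_match_list := by
  intro user_id banned_id _
  unfold Spec_check_match_list check_match_list check_match_list_alt
  apply List.map_congr_left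
  intro ban _
  rw [matchLoopA_eq, buckets_getD, filter_fold_eq, List.filter_map, List.filter_filter]
  congr 1
  apply List.filter_congr
  intro p hp
  obtain ⟨k, hk, rfl⟩ := (PySem.List.mem_enumerate_iff _ _ _).mp hp
  have hget : PySem.List.pyGet? user_id ((0 : Int) + (k : Int)) = some user_id[k] := by
    simp [hk]
  rw [checkMatchA_eq_allPos user_id _ _ ban hget]
  simp [Bool.and_comm]
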